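-- pv_equiv track=rewrite | github.com/giangttbkhn/fake_news_detection_system | kg/data/processor.py | _format_relation
-- ===== SOURCE A (Python) =====
-- def _format_relation(str):
--     arr = [pos for pos, char in enumerate(str) if char == " "]
--
--     result = ""
--     for index, item in enumerate(str):
--         if (index - 1) in arr:
--             result += item.upper()
--         else:
--             result += item
--
--     result = result.replace(" ", "")
--
--     return result
-- ===== SOURCE B (Python) =====
-- def _format_relation(str):
--     parts = str.split(" ")
--     return parts[0] + "".join(p[:1].upper() + p[1:] for p in parts[1:])
-- ===== Notes on version B (the rewrite author's own statement) =====
-- stated objective: idiomatic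
-- what changed: Instead of scanning every character against a precomputed list of space positions and then stripping spaces, B splits the string on " ", keeps the first segment, capitalizes the first character of each following segment via p[:1].upper() + p[1:], and joins with the empty string.
import Mathlib
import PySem

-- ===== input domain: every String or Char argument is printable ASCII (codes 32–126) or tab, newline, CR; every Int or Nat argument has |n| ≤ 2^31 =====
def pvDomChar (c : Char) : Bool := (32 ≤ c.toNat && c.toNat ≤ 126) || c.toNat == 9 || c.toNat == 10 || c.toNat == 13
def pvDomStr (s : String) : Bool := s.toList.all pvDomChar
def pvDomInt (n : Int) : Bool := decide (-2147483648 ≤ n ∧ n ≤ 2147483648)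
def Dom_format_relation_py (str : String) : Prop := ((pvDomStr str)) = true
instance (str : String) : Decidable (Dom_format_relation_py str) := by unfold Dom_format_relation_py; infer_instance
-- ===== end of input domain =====

-- B splits on " " and capitalizes the first character of every segment after the first
-- (idiomatic token-wise rewrite of A's character scan against an index set); same return value.

-- ===== PORT A =====
def format_relation_py (str : String) : String :=
  let cs := str.toList
  -- arr = [pos for pos, char in enumerate(str) if char == " "]
  let arr : List Int := ((PySem.List.enumerate cs).filter (fun p => p.2 == ' ')).map Prod.fst
  -- result = ""; for index, item in enumerate(str): append item.upper() or item
  let result : List Char := (PySem.List.enumerate cs).foldl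
    (fun r p => if arr.contains (p.1 - 1) then r ++ [PySem.Chars.upperChar p.2] else r ++ [p.2]) []
  -- result = result.replace(" ", "")
  String.ofList (PySem.Chars.replace result [' '] [])

-- ===== PORT B =====
-- p[:1].upper() + p[1:]
def pvCap (p : List Char) : List Char :=
  PySem.Chars.upper (PySem.List.slice p none (some 1)) ++ PySem.List.slice p (some 1) none

def format_relation_py_alt (str : String) : String :=
  let parts := PySem.Chars.splitOn str.toList [' ']
  -- parts[0] (split never returns an empty list) + "".join(cap(p) for p in parts[1:])
  String.ofList (parts.headD [] ++ PySem.Chars.join [] ((PySem.List.slice parts (some 1) none).map pvCap))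

-- ===== PRECONDITION & SPEC =====
def Spec_format_relation_py (str : String) (out : String) : Prop := out = format_relation_py_alt str
instance (str : String) (out : String) : Decidable (Spec_format_relation_py str out) := by unfold Spec_format_relation_py; infer_instance

-- ===== CLAIM (what is proved, stated in full; the proofs are below) =====
def Claim_equal_format_relation_py : Prop := ∀ (str : String), Dom_format_relation_py str → Spec_format_relation_py str (format_relation_py str)

-- ===== LEMMAS AND PROOFS =====

-- the common specification: scan left to right, b = "previous char was a space";
-- drop spaces, uppercase a char that follows a space
def pvNorm : Bool → List Char → List Char
  | _, [] => []
  | b, c :: t =>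
    if c = ' ' then pvNorm true t
    else (if b then PySem.Chars.upperChar c else c) :: pvNorm false t

-- structural split on a single space: (first segment, remaining segments)
def pvSp : List Char → List Char × List (List Char)
  | [] => ([], [])
  | c :: t => if c = ' ' then ([], (pvSp t).1 :: (pvSp t).2) else (c :: (pvSp t).1, (pvSp t).2)

lemma pv_upperChar_ne_space {c : Char} (hc : c ≠ ' ') : PySem.Chars.upperChar c ≠ ' ' := by
  unfold PySem.Chars.upperChar PySem.Chars.islower
  split
  · rename_i h
    simp only [Bool.and_eq_true, decide_eq_true_eq] at h
    have h1 : ('a' : Char).toNat ≤ c.toNat := h.1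
    have h2 : c.toNat ≤ ('z' : Char).toNat := h.2
    have ha : ('a' : Char).toNat = 97 := rfl
    have hz : ('z' : Char).toNat = 122 := rfl
    have hv : (c.toNat - 32).isValidChar := Or.inl (by omega)
    intro hEq
    have h3 := congrArg Char.toNat hEq
    rw [Char.toNat_ofNat, if_pos hv] at h3
    have hsp : (' ' : Char).toNat = 32 := rfl
    omega
  · exact hc

lemma pv_replace_go_filter :
    ∀ (fuel : Nat) (l acc : List Char), l.length ≤ fuel →
      PySem.Chars.replace.go [' '] [] fuel l acc = acc.reverse ++ l.filter (fun c => c != ' ') := by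
  intro fuel
  induction fuel with
  | zero =>
    intro l acc h
    have : l = [] := List.eq_nil_of_length_eq_zero (Nat.le_zero.mp h)
    subst this
    simp [PySem.Chars.replace.go]
  | succ n ih =>
    intro l acc h
    cases l with
    | nil => simp [PySem.Chars.replace.go]
    | cons c t =>
      by_cases hc : c = ' '
      · subst hc
        have hpre : [' '].isPrefixOf (' ' :: t) = true := by simp [List.isPrefixOf]
        simp only [PySem.Chars.replace.go, hpre, if_true, List.reverse_nil, List.nil_append]
        rw [show List.drop ([' '] : List Char).length (' ' :: t) = t from rfl]
        rw [ih t acc (by simp at h; omega)]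
        simp
      · have hpre : [' '].isPrefixOf (c :: t) = false := by
          simp [List.isPrefixOf]; exact fun h' => hc h'.symm
        simp only [PySem.Chars.replace.go, hpre, Bool.false_eq_true, if_false]
        rw [ih t (c :: acc) (by simp at h; omega)]
        simp [hc]

lemma pv_replace_space (l : List Char) :
    PySem.Chars.replace l [' '] [] = l.filter (fun c => c != ' ') := by
  have h : PySem.Chars.replace l [' '] [] = PySem.Chars.replace.go [' '] [] l.length l [] := by
    simp [PySem.Chars.replace]
  rw [h, pv_replace_go_filter l.length l [] (Nat.le_refl _)]
  simp

lemma pv_splitOn_go :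
    ∀ (fuel : Nat) (l cur : List Char) (acc : List (List Char)), l.length < fuel →
      PySem.Chars.splitOn.go [' '] fuel l cur acc =
        acc.reverse ++ ((cur.reverse ++ (pvSp l).1) :: (pvSp l).2) := by
  intro fuel
  induction fuel with
  | zero => intro l cur acc h; omega
  | succ n ih =>
    intro l cur acc h
    cases l with
    | nil => simp [PySem.Chars.splitOn.go, pvSp]
    | cons c t =>
      by_cases hc : c = ' '
      · subst hc
        have hpre : [' '].isPrefixOf (' ' :: t) = true := by simp [List.isPrefixOf]
        simp only [PySem.Chars.splitOn.go, hpre, if_true]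
        rw [show List.drop ([' '] : List Char).length (' ' :: t) = t from rfl]
        rw [ih t [] (cur.reverse :: acc) (by simp at h ⊢; omega)]
        simp [pvSp]
      · have hpre : [' '].isPrefixOf (c :: t) = false := by
          simp [List.isPrefixOf]; exact fun h' => hc h'.symm
        simp only [PySem.Chars.splitOn.go, hpre, Bool.false_eq_true, if_false]
        rw [ih t (c :: cur) acc (by simp at h ⊢; omega)]
        simp [pvSp, hc]

lemma pv_splitOn_space (l : List Char) :
    PySem.Chars.splitOn l [' '] = (pvSp l).1 :: (pvSp l).2 := by
  have h : PySem.Chars.splitOn l [' '] = PySem.Chars.splitOn.go [' '] (l.length + 1) l [] [] := by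
    simp [PySem.Chars.splitOn]
  rw [h, pv_splitOn_go (l.length + 1) l [] [] (by omega)]
  simp

lemma pv_join_nil_eq_flatten (parts : List (List Char)) :
    PySem.Chars.join [] parts = parts.flatten := by
  unfold PySem.Chars.join
  induction parts with
  | nil => simp [List.intercalate]
  | cons p ps ih =>
    cases ps with
    | nil => simp [List.intercalate, List.intersperse]
    | cons q qs =>
      simp only [List.intercalate, List.intersperse] at ih ⊢
      simp [ih]

lemma pvCap_nil : pvCap [] = [] := by decide

lemma pvCap_cons (c : Char) (t : List Char) : pvCap (c :: t) = PySem.Chars.upperChar c :: t := by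
  unfold pvCap
  rw [PySem.List.slice_to (c :: t) (by omega : (0:Int) ≤ 1), PySem.List.slice_from_one]
  simp [PySem.Chars.upper]

-- B's token-wise result equals pvNorm
lemma pv_b_norm (l : List Char) :
    pvNorm false l = (pvSp l).1 ++ ((pvSp l).2.map pvCap).flatten ∧
    pvNorm true l = pvCap (pvSp l).1 ++ ((pvSp l).2.map pvCap).flatten := by
  induction l with
  | nil => simp [pvNorm, pvSp, pvCap_nil]
  | cons c t ih =>
    by_cases hc : c = ' '
    · subst hc
      simp only [pvNorm, pvSp, if_true, List.map_cons, List.flatten_cons, List.nil_append]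
      exact ⟨ih.2, ih.2⟩
    · simp only [pvNorm, pvSp, hc, if_false]
      constructor
      · simp [ih.1]
      · rw [pvCap_cons]
        simp [ih.1]

-- membership in A's space-position list
lemma pv_arr_mem (cs : List Char) (k : Int) :
    (((PySem.List.enumerate cs).filter (fun p => p.2 == ' ')).map Prod.fst).contains k = true ↔
      ∃ (j : Nat) (hj : j < cs.length), k = j ∧ cs[j] = ' ' := by
  rw [List.contains_iff_mem]
  simp only [List.mem_map, List.mem_filter]
  constructor
  · rintro ⟨p, ⟨hp, hsp⟩, hk⟩
    rw [PySem.List.mem_enumerate_iff] at hp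
    obtain ⟨j, hj, rfl⟩ := hp
    simp only [beq_iff_eq] at hsp
    exact ⟨j, hj, by simpa using hk.symm, hsp⟩
  · rintro ⟨j, hj, rfl, hsp⟩
    exact ⟨((j : Int), cs[j]), ⟨(PySem.List.mem_enumerate_iff _ _ _).mpr ⟨j, hj, by simp⟩, by simp [hsp]⟩, by simp⟩

-- A's mapped-and-filtered scan equals pvNorm, for any index set 'arr' consistent with the suffix
lemma pv_a_norm (arr : List Int) :
    ∀ (l : List Char) (s : Int) (b : Bool),
      arr.contains (s - 1) = b →
      (∀ (k : Nat), (hk : k < l.length) → arr.contains (s + k) = (l[k] == ' ')) →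
      ((PySem.List.enumerate l s).map
          (fun p => if arr.contains (p.1 - 1) then PySem.Chars.upperChar p.2 else p.2)).filter
          (fun c => c != ' ') = pvNorm b l := by
  intro l
  induction l with
  | nil => intro s b _ _; simp [pvNorm, PySem.List.enumerate]
  | cons c t ih =>
    intro s b hb H
    rw [PySem.List.enumerate_cons]
    simp only [List.map_cons, List.filter_cons, hb]
    have h0 : arr.contains s = (c == ' ') := by simpa using H 0 (by simp)
    have H' : ∀ (k : Nat), (hk : k < t.length) → arr.contains (s + 1 + k) = (t[k] == ' ') := by
      intro k hk
      have hx := H (k + 1) (by simpa using Nat.succ_lt_succ hk)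
      simpa [add_assoc, add_comm, add_left_comm] using hx
    by_cases hc : c = ' '
    · subst hc
      have hhead : (if b then PySem.Chars.upperChar ' ' else ' ') = ' ' := by
        cases b <;> simp [show PySem.Chars.upperChar ' ' = ' ' from by decide]
      rw [hhead]
      simp only [bne_self_eq_false, Bool.false_eq_true, if_false]
      rw [ih (s + 1) true (by simpa using h0) H']
      simp [pvNorm]
    · have hhead : ((if b then PySem.Chars.upperChar c else c) != ' ') = true := by
        cases b
        · simpa using hc
        · simpa using pv_upperChar_ne_space hc
      rw [hhead]
      simp only [if_true]
      have hprev : arr.contains (s + 1 - 1) = false := by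
        rw [show s + 1 - 1 = s from by omega, h0]
        simp [hc]
      rw [ih (s + 1) false hprev H']
      simp [pvNorm, hc]

lemma pv_fold_map (arr : List Int) (l : List (Int × Char)) :
    l.foldl (fun r p => if arr.contains (p.1 - 1) then r ++ [PySem.Chars.upperChar p.2]
      else r ++ [p.2]) [] =
    l.map (fun p => if arr.contains (p.1 - 1) then PySem.Chars.upperChar p.2 else p.2) := by
  rw [show (fun (r : List Char) (p : Int × Char) =>
      if arr.contains (p.1 - 1) then r ++ [PySem.Chars.upperChar p.2] else r ++ [p.2]) =
      (fun r p => r ++ [if arr.contains (p.1 - 1) then PySem.Chars.upperChar p.2 else p.2]) from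
    funext fun r => funext fun p => by split <;> rfl]
  rw [PySem.List.foldl_append_singleton_eq_map]
  simp

-- A's port computes pvNorm false
lemma pv_a_eq (str : String) : format_relation_py str = String.ofList (pvNorm false str.toList) := by
  show String.ofList (PySem.Chars.replace
      ((PySem.List.enumerate str.toList).foldl
        (fun r p => if (((PySem.List.enumerate str.toList).filter
            (fun p => p.2 == ' ')).map Prod.fst).contains (p.1 - 1)
          then r ++ [PySem.Chars.upperChar p.2] else r ++ [p.2]) [])
      [' '] []) = _
  rw [pv_fold_map, pv_replace_space]
  congr 1
  apply pv_a_norm _ str.toList 0 false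
  · have hno : ¬ (((PySem.List.enumerate str.toList).filter
        (fun p => p.2 == ' ')).map Prod.fst).contains ((0:Int) - 1) = true := by
      rw [pv_arr_mem]
      rintro ⟨j, hj, hje, _⟩
      omega
    simpa using hno
  · intro k hk
    by_cases hsp : str.toList[k] = ' '
    · simp only [hsp, beq_self_eq_true]
      rw [pv_arr_mem]
      exact ⟨k, hk, by simp, hsp⟩
    · have hno : ¬ (((PySem.List.enumerate str.toList).filter
          (fun p => p.2 == ' ')).map Prod.fst).contains ((0:Int) + k) = true := by
        rw [pv_arr_mem]
        rintro ⟨j, hj, hje, hsj⟩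
        have hjk : j = k := by omega
        subst hjk
        exact hsp hsj
      simp only [Bool.not_eq_true] at hno
      rw [hno]
      symm
      rw [beq_eq_false_iff_ne]
      exact hsp

-- B's port computes pvNorm false
lemma pv_b_eq (str : String) : format_relation_py_alt str = String.ofList (pvNorm false str.toList) := by
  unfold format_relation_py_alt
  rw [pv_splitOn_space]
  simp only [List.headD_cons, PySem.List.slice_from_one, List.tail_cons]
  rw [pv_join_nil_eq_flatten]
  congr 1
  exact (pv_b_norm str.toList).1.symm

-- ===== VERDICT (by name: the statement is the Claim_ definition above) =====
theorem format_relation_py_spec : Claim_equal_format_relation_py := by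
  intro str _
  unfold Spec_format_relation_py
  rw [pv_a_eq, pv_b_eq]
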